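-- pv_equiv track=rewrite | github.com/majoporse/uni | ib111/04/p2_isbn.py | isbn13_validator
-- ===== SOURCE A (Python) =====
-- def isbn13_validator(isbn):
--     if len(isbn) != 13:
--         return False
--     count = 0
--     for i in range(1, len(isbn)+1):
--         if ord(isbn[-i]) in range(48, 58):
--             count += int(isbn[-i]) * (3 if i % 2 == 0 else 1)
--         else:
--             return False
--     if count % 10 != 0:
--         return False
--     return True
-- ===== SOURCE B (Python) =====
-- def isbn13_validator(isbn):
--     if len(isbn) != 13 or not isbn.isdigit():
--         return False
--     digits = [ord(c) - 48 for c in isbn]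
--     return (sum(digits[0::2]) + 3 * sum(digits[1::2])) % 10 == 0
-- ===== Notes on version B (the rewrite author's own statement) =====
-- stated objective: idiomatic
-- what changed: A's single back-to-front indexed loop that interleaves per-character validation, alternating 1/3 weights and early exit is replaced by an isdigit()/length rejection followed by splitting the digit list into the two stride-2 slices isbn[0::2] and isbn[1::2] and checking (sum(evens) + 3*sum(odds)) % 10 == 0, so no per-position weight alternation or early exit remains.
import Mathlib
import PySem

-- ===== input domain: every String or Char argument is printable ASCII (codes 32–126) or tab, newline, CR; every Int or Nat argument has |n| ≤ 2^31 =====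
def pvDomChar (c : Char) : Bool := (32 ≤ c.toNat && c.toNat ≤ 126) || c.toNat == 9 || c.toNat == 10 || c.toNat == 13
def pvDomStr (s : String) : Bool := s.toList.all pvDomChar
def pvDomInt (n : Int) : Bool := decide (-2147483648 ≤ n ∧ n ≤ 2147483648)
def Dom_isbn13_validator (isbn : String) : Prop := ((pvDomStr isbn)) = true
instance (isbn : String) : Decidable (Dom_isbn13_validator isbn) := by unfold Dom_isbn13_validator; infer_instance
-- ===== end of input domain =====

-- B replaces A's single back-to-front loop (validation, alternating 1/3 weights and early
-- exit interleaved) with an isdigit/length rejection, then two stride-2 slices summed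
-- separately with a single ×3 (objective: idiomatic).

-- ===== PORT A =====
-- int(c) for a single ASCII digit character c equals its code point minus 48 (exact on the digit branch where it is used)
def isbnDigitVal (c : Char) : Int := (c.toNat : Int) - 48

-- A's loop over i in range(1, len(isbn)+1): early return False on a non-digit at isbn[-i],
-- else accumulate; after the loop the count % 10 check (Lean's Int '%' agrees with Python's for the positive divisors 10 and 2 used here)
def isbnLoopA (s : List Char) : List Int → Int → Bool
  | [], count => count % 10 == 0
  | i :: rest, count =>
    match PySem.List.pyGet? s (-i) with
    | some c =>
      if 48 ≤ c.toNat && c.toNat < 58 then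
        isbnLoopA s rest (count + isbnDigitVal c * (if i % 2 == 0 then 3 else 1))
      else false
    | none => false

def isbn13_validator (isbn : String) : Bool :=
  let s := isbn.toList
  if s.length ≠ 13 then false
  else isbnLoopA s (PySem.List.pyRange 1 (s.length + 1) 1) 0

-- ===== PORT B =====
def isbn13_validator_alt (isbn : String) : Bool :=
  let s := isbn.toList
  if s.length ≠ 13 ∨ ¬ PySem.Chars.strIsdigit s then false
  else
    let digits := s.map (fun c => ((c.toNat : Int) - 48))
    -- step 2 ≠ 0, so slice? never returns none; getD [] is only a totality default
    let evens := (PySem.List.slice? digits (some 0) none 2).getD []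
    let odds  := (PySem.List.slice? digits (some 1) none 2).getD []
    (evens.sum + 3 * odds.sum) % 10 == 0  -- Python '%' = Lean '%' for the positive divisor 10

-- ===== PRECONDITION & SPEC =====
def Spec_isbn13_validator (isbn : String) (out : Bool) : Prop := out = isbn13_validator_alt isbn
instance (isbn : String) (out : Bool) : Decidable (Spec_isbn13_validator isbn out) := by unfold Spec_isbn13_validator; infer_instance

-- ===== CLAIM (what is proved, stated in full; the proofs are below) =====
def Claim_equal_isbn13_validator : Prop := ∀ (isbn : String), Dom_isbn13_validator isbn → Spec_isbn13_validator isbn (isbn13_validator isbn)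

-- ===== LEMMAS AND PROOFS =====
lemma isbn_digit_iff (c : Char) : ('0' ≤ c ∧ c ≤ '9') ↔ (48 ≤ c.toNat ∧ c.toNat < 58) := by
  unfold Char.toNat
  simp [Char.le_def, UInt32.le_iff_toNat_le]
  omega


lemma isbn_slice_even (d1 d2 d3 d4 d5 d6 d7 d8 d9 d10 d11 d12 d13 : Int) :
    PySem.List.slice? [d1,d2,d3,d4,d5,d6,d7,d8,d9,d10,d11,d12,d13] (some 0) none 2
      = some [d1,d3,d5,d7,d9,d11,d13] := by
  simp [PySem.List.slice?, PySem.List.sliceIndices, List.range_succ]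

lemma isbn_slice_odd (d1 d2 d3 d4 d5 d6 d7 d8 d9 d10 d11 d12 d13 : Int) :
    PySem.List.slice? [d1,d2,d3,d4,d5,d6,d7,d8,d9,d10,d11,d12,d13] (some 1) none 2
      = some [d2,d4,d6,d8,d10,d12] := by
  simp [PySem.List.slice?, PySem.List.sliceIndices, List.range_succ]

-- ===== VERDICT (by name: the statement is the Claim_ definition above) =====
set_option maxHeartbeats 1000000 in
theorem isbn13_validator_spec : Claim_equal_isbn13_validator := by
  intro isbn _
  unfold Spec_isbn13_validator isbn13_validator isbn13_validator_alt
  generalize isbn.toList = s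
  by_cases hl : s.length = 13
  case neg => simp [hl]
  match s, hl with
  | [a1,a2,a3,a4,a5,a6,a7,a8,a9,a10,a11,a12,a13], _ =>
    have hr : PySem.List.pyRange 1 14 1 = ([1,2,3,4,5,6,7,8,9,10,11,12,13] : List Int) := by decide
    simp only [List.length_cons, List.length_nil]
    norm_num [hr, isbnLoopA, PySem.List.pyGet?, PySem.List.pyIdx?,
      PySem.Chars.strIsdigit, PySem.Chars.isdigit, List.all, isbnDigitVal, isbn_digit_iff,
      List.map_cons, List.map_nil, isbn_slice_even, isbn_slice_odd, Option.getD,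
      List.getElem?_cons, List.getElem?_nil]
    simp [Int.toNat]
    ring_nf
    simp [Bool.and_comm, Bool.and_left_comm, Bool.and_assoc]
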